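-- pv_equiv track=rewrite | github.com/zachariahcox/spells | python/generate_kusto_table_from_yaml.py | org_size_count
-- ===== SOURCE A (Python) =====
-- def org_size_count(h, include_managers=True):
--     counts = {}
--
--     def sub_org_size(m):
--         count = counts.get(m)
--         if count is None:
--             count = 0
--             employees = h.get(m)
--             if employees:
--                 for e in employees:
--                     count += sub_org_size(e)
--                     if include_managers or e not in h:
--                         count += 1
--             counts[m] = count
--         return count
--
--     for m in h.keys():
--         counts[m] = sub_org_size(m)
--
--     return counts
-- ===== SOURCE B (Python) =====
-- def org_size_count(h, include_managers=True):
--     counts = {}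
--     stack = [(m, False) for m in reversed(list(h.keys()))]
--     while stack:
--         m, expanded = stack.pop()
--         if m in counts:
--             continue
--         employees = h.get(m) or []
--         if not expanded:
--             stack.append((m, True))
--             for e in reversed(employees):
--                 stack.append((e, False))
--         else:
--             total = 0
--             for e in employees:
--                 total += counts[e]
--                 if include_managers or e not in h:
--                     total += 1
--             counts[m] = total
--     return counts
-- ===== Notes on version B (the rewrite author's own statement) =====
-- stated objective: alternative
-- what changed: Replaces the memoized recursion with an explicit two-phase (expand / finalize) post-order stack traversal that builds the same counts dict iteratively, computing each node's total from its children's already-stored counts.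
import Mathlib
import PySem

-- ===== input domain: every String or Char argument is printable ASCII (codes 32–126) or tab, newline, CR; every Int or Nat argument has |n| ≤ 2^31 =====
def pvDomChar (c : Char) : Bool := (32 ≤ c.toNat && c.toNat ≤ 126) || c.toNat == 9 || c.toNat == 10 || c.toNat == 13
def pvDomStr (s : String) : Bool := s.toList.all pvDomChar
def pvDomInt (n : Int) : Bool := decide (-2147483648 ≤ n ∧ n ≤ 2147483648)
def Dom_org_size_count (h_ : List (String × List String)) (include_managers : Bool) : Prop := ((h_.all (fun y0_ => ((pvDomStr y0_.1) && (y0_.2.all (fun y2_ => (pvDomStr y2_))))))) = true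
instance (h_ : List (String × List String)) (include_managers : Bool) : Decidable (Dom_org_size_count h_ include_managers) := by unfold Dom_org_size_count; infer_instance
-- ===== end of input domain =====

-- B replaces A's memoized recursion by an explicit two-phase post-order stack traversal
-- (alternative decomposition, same asymptotic cost); return values proved equal on acyclic inputs.

-- ===== PORT A =====
-- A's inner recursion sub_org_size, with a fuel parameter added only to make the
-- Lean function total: fuel 0 (= none) is reached only when Python A's recursion
-- would not terminate (cyclic h), which Pre_ excludes.  The 'if employees:' guard
-- of A is ported as folding over (h.get? m).getD [] — for None or [] the loop body
-- runs zero times and count stays 0, exactly as in A.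
def subOrg (h : PySem.Dict String (List String)) (inc : Bool) :
    Nat → String → PySem.Dict String Int → Option (Int × PySem.Dict String Int)
  | 0, _, _ => none
  | fuel+1, m, counts =>
    match counts.get? m with
    | some count => some (count, counts)
    | none =>
      match ((h.get? m).getD []).foldl
          (fun acc e =>
            match acc with
            | none => none
            | some (count, counts) =>
              match subOrg h inc fuel e counts with
              | none => none
              | some (c, counts1) =>
                let count := count + c
                some (if inc || !(h.contains e) then count + 1 else count, counts1))
          (some ((0 : Int), counts)) with
      | none => none
      | some (count, counts1) => some (count, counts1.insert m count)

def org_size_count (h_ : List (String × List String)) (include_managers : Bool) : List (String × Int) :=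
  let h := PySem.Dict.mk h_
  let fuel := h_.length + 2   -- ≥ recursion depth + 1 on any acyclic input (proved below)
  (h.keys.foldl
    (fun counts m =>
      match subOrg h include_managers fuel m counts with
      | none => counts        -- unreachable on inputs satisfying Pre_
      | some (c, counts1) => counts1.insert m c)
    PySem.Dict.empty).items

-- ===== PORT B =====
-- total size of all employee lists (used only to pick a generous loop-fuel bound)
def oscD (h_ : List (String × List String)) : Nat := (h_.map (fun p => p.2.length)).sum

-- B's while-loop over the explicit stack.  The Python stack (append/pop at the right
-- end) is represented head-as-top, so 'for e in reversed(employees): stack.append(…)'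
-- is prepending 'employees.map (·, false)'.  The fuel argument only makes the Lean
-- function total: it runs out (returning counts as-is) only when Python B's while
-- loop would not terminate (cyclic h), which Pre_ excludes.  counts[e] is ported as
-- counts.getD e 0: on inputs satisfying Pre_ the key is always present there (proved
-- below), and on cyclic inputs this line is never the observable behaviour.
def loopB (h : PySem.Dict String (List String)) (inc : Bool) :
    Nat → List (String × Bool) → PySem.Dict String Int → PySem.Dict String Int
  | _, [], counts => counts
  | 0, _ :: _, counts => counts
  | fuel+1, (m, expanded) :: rest, counts =>
    if counts.contains m then loopB h inc fuel rest counts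
    else
      let employees := (h.get? m).getD []
      if !expanded then
        loopB h inc fuel (employees.map (fun e => (e, false)) ++ (m, true) :: rest) counts
      else
        let total := employees.foldl
          (fun t e =>
            let t := t + counts.getD e 0
            if inc || !(h.contains e) then t + 1 else t) 0
        loopB h inc fuel rest (counts.insert m total)

def org_size_count_alt (h_ : List (String × List String)) (include_managers : Bool) : List (String × Int) :=
  let h := PySem.Dict.mk h_
  let fuel := (h_.length + oscD h_ + 2) * (oscD h_ + 2)  -- ≥ #loop iterations on any acyclic input (proved below)
  (loopB h include_managers fuel (h.keys.map (fun m => (m, false))) PySem.Dict.empty).items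

-- ===== PRECONDITION & SPEC =====
-- computable reachability: the set of nodes reachable from x in at most n+1 edge steps
def oscNbrsF (h_ : List (String × List String)) (x : String) : Finset String :=
  (((PySem.Dict.mk h_).get? x).getD []).toFinset

def oscS (h_ : List (String × List String)) (x : String) : Nat → Finset String
  | 0 => oscNbrsF h_ x
  | n+1 => oscS h_ x n ∪ (oscS h_ x n).biUnion (oscNbrsF h_)

def oscN (h_ : List (String × List String)) : Nat :=
  ((h_.map Prod.fst ++ h_.flatMap (fun p => p.2)).toFinset).card + 1

-- Pre_: the manager graph has no cycle (no key reaches itself).  This is exactly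
-- where Python A returns: on a cyclic h its recursion never terminates (RecursionError).
def Pre_org_size_count (h_ : List (String × List String)) (include_managers : Bool) : Prop :=
  ∀ k ∈ h_.map Prod.fst, k ∉ oscS h_ k (oscN h_)
instance (h_ : List (String × List String)) (include_managers : Bool) : Decidable (Pre_org_size_count h_ include_managers) := by unfold Pre_org_size_count; infer_instance

def pvWitness_org_size_count : (List (String × List String)) × Bool :=
  ([("a", ["b", "c"]), ("b", ["c", "d"])], true)

def Spec_org_size_count (h_ : List (String × List String)) (include_managers : Bool) (out : List (String × Int)) : Prop := out = org_size_count_alt h_ include_managers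
instance (h_ : List (String × List String)) (include_managers : Bool) (out : List (String × Int)) : Decidable (Spec_org_size_count h_ include_managers out) := by unfold Spec_org_size_count; infer_instance

-- ===== CLAIM (what is proved, stated in full; the proofs are below) =====
def Claim_equal_org_size_count : Prop := ∀ (h_ : List (String × List String)) (include_managers : Bool), Dom_org_size_count h_ include_managers → Pre_org_size_count h_ include_managers → Spec_org_size_count h_ include_managers (org_size_count h_ include_managers)

-- ===== LEMMAS AND PROOFS =====

-- edge relation of the manager graph, and (nonempty-path) reachability
def oscEdge (h : PySem.Dict String (List String)) (x y : String) : Prop :=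
  y ∈ (h.get? x).getD []

inductive oscReach (h : PySem.Dict String (List String)) : String → String → Prop
  | single {x y} : oscEdge h x y → oscReach h x y
  | tail {x y z} : oscReach h x y → oscEdge h y z → oscReach h x z

def oscAcyc (h : PySem.Dict String (List String)) : Prop := ∀ x, ¬ oscReach h x x

-- proof-side explicit form of A's inner foldl loop
def subOrgList (h : PySem.Dict String (List String)) (inc : Bool) (fuel : Nat) :
    List String → Int → PySem.Dict String Int → Option (Int × PySem.Dict String Int)
  | [], count, counts => some (count, counts)
  | e :: es, count, counts =>
    match subOrg h inc fuel e counts with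
    | none => none
    | some (c, counts1) =>
      subOrgList h inc fuel es (if inc || !(h.contains e) then count + c + 1 else count + c) counts1

def oscDb (h : PySem.Dict String (List String)) : Nat := (h.items.map (fun p => p.2.length)).sum

theorem osc_foldl_eq_subOrgList (h : PySem.Dict String (List String)) (inc : Bool) (fuel : Nat)
    (es : List String) (count : Int) (counts : PySem.Dict String Int) :
    es.foldl
      (fun acc e =>
        match acc with
        | none => none
        | some (count, counts) =>
          match subOrg h inc fuel e counts with
          | none => none
          | some (c, counts1) =>
            let count := count + c
            some (if inc || !(h.contains e) then count + 1 else count, counts1))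
      (some (count, counts)) = subOrgList h inc fuel es count counts := by
  have hnone : ∀ (l : List String), l.foldl
      (fun acc e =>
        match acc with
        | none => none
        | some (count, counts) =>
          match subOrg h inc fuel e counts with
          | none => none
          | some (c, counts1) =>
            let count := count + c
            some (if inc || !(h.contains e) then count + 1 else count, counts1))
      none = none := by
    intro l; induction l with
    | nil => rfl
    | cons e l ih => simpa using ih
  induction es generalizing count counts with
  | nil => rfl
  | cons e es ih =>
    simp only [List.foldl_cons, subOrgList]
    cases hs : subOrg h inc fuel e counts with
    | none => simpa using hnone es
    | some p =>
      obtain ⟨c, counts1⟩ := p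
      simpa using ih (if inc || !(h.contains e) then count + c + 1 else count + c) counts1

theorem osc_subOrg_succ (h : PySem.Dict String (List String)) (inc : Bool) (fuel : Nat)
    (m : String) (counts : PySem.Dict String Int) :
    subOrg h inc (fuel+1) m counts =
      match counts.get? m with
      | some count => some (count, counts)
      | none =>
        match subOrgList h inc fuel ((h.get? m).getD []) 0 counts with
        | none => none
        | some (count, counts1) => some (count, counts1.insert m count) := by
  rw [subOrg]
  cases hg : counts.get? m with
  | some c => rfl
  | none => rw [osc_foldl_eq_subOrgList]

theorem osc_get?_key {h : PySem.Dict String (List String)} {x : String} {vs : List String}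
    (hg : h.get? x = some vs) : x ∈ h.keys :=
  PySem.Dict.mem_keys_of_mem_items h (PySem.Dict.mem_items_of_get?_eq_some h hg)

theorem osc_get?_mem_flat {h : PySem.Dict String (List String)} {x : String} {vs : List String}
    (hg : h.get? x = some vs) {z : String} (hz : z ∈ vs) :
    z ∈ h.items.flatMap (fun p => p.2) :=
  List.mem_flatMap.2 ⟨(x, vs), PySem.Dict.mem_items_of_get?_eq_some h hg, hz⟩

theorem osc_nbrs_len (h : PySem.Dict String (List String)) (x : String) :
    ((h.get? x).getD []).length ≤ oscDb h := by
  cases hg : h.get? x with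
  | none => simp
  | some vs =>
    have hmem : (x, vs) ∈ h.items := PySem.Dict.mem_items_of_get?_eq_some h hg
    have : vs.length ∈ h.items.map (fun p => p.2.length) :=
      List.mem_map.2 ⟨(x, vs), hmem, rfl⟩
    simpa [oscDb] using List.single_le_sum (by intro y _; omega) _ this

theorem osc_ret {h : PySem.Dict String (List String)} {inc : Bool} {fuel : Nat}
    {m : String} {counts : PySem.Dict String Int} {c : Int} {counts' : PySem.Dict String Int}
    (hs : subOrg h inc fuel m counts = some (c, counts')) : counts'.get? m = some c := by
  cases fuel with
  | zero => cases hs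
  | succ n =>
    rw [osc_subOrg_succ] at hs
    cases hg : counts.get? m with
    | some c0 =>
      rw [hg] at hs
      simp only [Option.some.injEq, Prod.mk.injEq] at hs
      obtain ⟨h1, h2⟩ := hs
      rw [← h2, hg, h1]
    | none =>
      rw [hg] at hs
      cases hl : subOrgList h inc n ((h.get? m).getD []) 0 counts with
      | none => rw [hl] at hs; cases hs
      | some p =>
        obtain ⟨v, c2⟩ := p
        rw [hl] at hs
        simp only [Option.some.injEq, Prod.mk.injEq] at hs
        obtain ⟨h1, h2⟩ := hs
        rw [← h2, ← h1]
        exact PySem.Dict.get?_insert_self c2 m v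

-- entries already present are preserved (subOrg only inserts fresh keys)
theorem osc_extP {h : PySem.Dict String (List String)} {inc : Bool} : ∀ (fuel : Nat)
    {m : String} {counts : PySem.Dict String Int} {c : Int} {counts' : PySem.Dict String Int},
    subOrg h inc fuel m counts = some (c, counts') →
    ∀ {k : String} {w : Int}, counts.get? k = some w → counts'.get? k = some w := by
  intro fuel
  induction fuel with
  | zero => intro m counts c counts' hs; cases hs
  | succ n ih =>
    have hq : ∀ (es : List String) {a : Int} {c0 : PySem.Dict String Int} {cc : Int}
        {c2 : PySem.Dict String Int}, subOrgList h inc n es a c0 = some (cc, c2) →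
        ∀ {k : String} {w : Int}, c0.get? k = some w → c2.get? k = some w := by
      intro es
      induction es with
      | nil => intro a c0 cc c2 hs k w hk; cases hs; exact hk
      | cons e es ihe =>
        intro a c0 cc c2 hs k w hk
        simp only [subOrgList] at hs
        cases hsu : subOrg h inc n e c0 with
        | none => rw [hsu] at hs; cases hs
        | some p =>
          obtain ⟨v, c1⟩ := p
          rw [hsu] at hs
          exact ihe hs (ih hsu hk)
    intro m counts c counts' hs k w hk
    rw [osc_subOrg_succ] at hs
    cases hg : counts.get? m with
    | some c0 =>
      rw [hg] at hs
      simp only [Option.some.injEq, Prod.mk.injEq] at hs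
      rw [← hs.2]; exact hk
    | none =>
      rw [hg] at hs
      cases hl : subOrgList h inc n ((h.get? m).getD []) 0 counts with
      | none => rw [hl] at hs; cases hs
      | some p =>
        obtain ⟨v, c2⟩ := p
        rw [hl] at hs
        simp only [Option.some.injEq, Prod.mk.injEq] at hs
        rw [← hs.2]
        have hkm : k ≠ m := by
          intro he; rw [he, hg] at hk; cases hk
        rw [PySem.Dict.get?_insert]
        rw [if_neg hkm]
        exact hq _ hl hk

theorem osc_extQ {h : PySem.Dict String (List String)} {inc : Bool} {fuel : Nat} : ∀ {es : List String}
    {a : Int} {counts : PySem.Dict String Int} {c : Int} {counts' : PySem.Dict String Int},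
    subOrgList h inc fuel es a counts = some (c, counts') →
    ∀ {k : String} {w : Int}, counts.get? k = some w → counts'.get? k = some w := by
  intro es
  induction es with
  | nil => intro a counts c counts' hs k w hk; cases hs; exact hk
  | cons e es ihe =>
    intro a counts c counts' hs k w hk
    simp only [subOrgList] at hs
    cases hsu : subOrg h inc fuel e counts with
    | none => rw [hsu] at hs; cases hs
    | some p =>
      obtain ⟨v, c1⟩ := p
      rw [hsu] at hs
      exact ihe hs (osc_extP fuel hsu hk)

theorem osc_reach_trans {h : PySem.Dict String (List String)} {x y z : String}
    (h1 : oscReach h x y) (h2 : oscReach h y z) : oscReach h x z := by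
  induction h2 with
  | single e => exact .tail h1 e
  | tail _ e ih => exact .tail ih e

-- freshly inserted keys are the argument or reachable from it
theorem osc_newP {h : PySem.Dict String (List String)} {inc : Bool} : ∀ (fuel : Nat)
    {m : String} {counts : PySem.Dict String Int} {c : Int} {counts' : PySem.Dict String Int},
    subOrg h inc fuel m counts = some (c, counts') →
    ∀ {k : String}, counts.get? k = none → counts'.get? k ≠ none → k = m ∨ oscReach h m k := by
  intro fuel
  induction fuel with
  | zero => intro m counts c counts' hs; cases hs
  | succ n ih =>
    have hq : ∀ (es : List String) {a : Int} {c0 : PySem.Dict String Int} {cc : Int}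
        {c2 : PySem.Dict String Int}, subOrgList h inc n es a c0 = some (cc, c2) →
        ∀ {k : String}, c0.get? k = none → c2.get? k ≠ none → ∃ e ∈ es, k = e ∨ oscReach h e k := by
      intro es
      induction es with
      | nil => intro a c0 cc c2 hs k hk0 hk1; cases hs; exact absurd hk0 hk1
      | cons e es ihe =>
        intro a c0 cc c2 hs k hk0 hk1
        simp only [subOrgList] at hs
        cases hsu : subOrg h inc n e c0 with
        | none => rw [hsu] at hs; cases hs
        | some p =>
          obtain ⟨v, c1⟩ := p
          rw [hsu] at hs
          cases hmid : c1.get? k with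
          | none =>
            obtain ⟨e', he', hr⟩ := ihe hs hmid hk1
            exact ⟨e', List.mem_cons_of_mem _ he', hr⟩
          | some w =>
            have := ih hsu hk0 (by simp [hmid])
            exact ⟨e, List.mem_cons_self, this⟩
    intro m counts c counts' hs k hk0 hk1
    rw [osc_subOrg_succ] at hs
    cases hg : counts.get? m with
    | some c0 =>
      rw [hg] at hs
      simp only [Option.some.injEq, Prod.mk.injEq] at hs
      rw [← hs.2] at hk1
      exact absurd hk0 hk1
    | none =>
      rw [hg] at hs
      cases hl : subOrgList h inc n ((h.get? m).getD []) 0 counts with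
      | none => rw [hl] at hs; cases hs
      | some p =>
        obtain ⟨v, c2⟩ := p
        rw [hl] at hs
        simp only [Option.some.injEq, Prod.mk.injEq] at hs
        rw [← hs.2] at hk1
        by_cases hkm : k = m
        · exact Or.inl hkm
        · rw [PySem.Dict.get?_insert, if_neg hkm] at hk1
          obtain ⟨e, he, hr⟩ := hq _ hl hk0 hk1
          have hedge : oscEdge h m e := he
          right
          cases hr with
          | inl heq => rw [heq]; exact .single hedge
          | inr hre => exact osc_reach_trans (.single hedge) hre

theorem osc_newQ {h : PySem.Dict String (List String)} {inc : Bool} {fuel : Nat} : ∀ {es : List String}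
    {a : Int} {counts : PySem.Dict String Int} {c : Int} {counts' : PySem.Dict String Int},
    subOrgList h inc fuel es a counts = some (c, counts') →
    ∀ {k : String}, counts.get? k = none → counts'.get? k ≠ none → ∃ e ∈ es, k = e ∨ oscReach h e k := by
  intro es
  induction es with
  | nil => intro a counts c counts' hs k hk0 hk1; cases hs; exact absurd hk0 hk1
  | cons e es ihe =>
    intro a counts c counts' hs k hk0 hk1
    simp only [subOrgList] at hs
    cases hsu : subOrg h inc fuel e counts with
    | none => rw [hsu] at hs; cases hs
    | some p =>
      obtain ⟨v, c1⟩ := p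
      rw [hsu] at hs
      cases hmid : c1.get? k with
      | none =>
        obtain ⟨e', he', hr⟩ := ihe hs hmid hk1
        exact ⟨e', List.mem_cons_of_mem _ he', hr⟩
      | some w =>
        have := osc_newP fuel hsu hk0 (by simp [hmid])
        exact ⟨e, List.mem_cons_self, this⟩

theorem osc_nodupP {h : PySem.Dict String (List String)} {inc : Bool} : ∀ (fuel : Nat)
    {m : String} {counts : PySem.Dict String Int} {c : Int} {counts' : PySem.Dict String Int},
    subOrg h inc fuel m counts = some (c, counts') → counts.keys.Nodup → counts'.keys.Nodup := by
  intro fuel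
  induction fuel with
  | zero => intro m counts c counts' hs; cases hs
  | succ n ih =>
    have hq : ∀ (es : List String) {a : Int} {c0 : PySem.Dict String Int} {cc : Int}
        {c2 : PySem.Dict String Int}, subOrgList h inc n es a c0 = some (cc, c2) →
        c0.keys.Nodup → c2.keys.Nodup := by
      intro es
      induction es with
      | nil => intro a c0 cc c2 hs hnd; cases hs; exact hnd
      | cons e es ihe =>
        intro a c0 cc c2 hs hnd
        simp only [subOrgList] at hs
        cases hsu : subOrg h inc n e c0 with
        | none => rw [hsu] at hs; cases hs
        | some p =>
          obtain ⟨v, c1⟩ := p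
          rw [hsu] at hs
          exact ihe hs (ih hsu hnd)
    intro m counts c counts' hs hnd
    rw [osc_subOrg_succ] at hs
    cases hg : counts.get? m with
    | some c0 =>
      rw [hg] at hs
      simp only [Option.some.injEq, Prod.mk.injEq] at hs
      rw [← hs.2]; exact hnd
    | none =>
      rw [hg] at hs
      cases hl : subOrgList h inc n ((h.get? m).getD []) 0 counts with
      | none => rw [hl] at hs; cases hs
      | some p =>
        obtain ⟨v, c2⟩ := p
        rw [hl] at hs
        simp only [Option.some.injEq, Prod.mk.injEq] at hs
        rw [← hs.2]
        exact PySem.Dict.nodup_keys_insert _ _ _ (hq _ hl hnd)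

-- fuel sufficiency for A: on an acyclic graph, fuel (#keys + 1) is enough
theorem osc_a1 {h : PySem.Dict String (List String)} {inc : Bool} (hac : oscAcyc h) :
    ∀ (n : Nat) (V : Finset String) (x : String), V ⊆ h.keys.toFinset →
      (∀ v ∈ V, oscReach h v x) → h.keys.toFinset.card + 1 ≤ n + V.card →
      ∀ counts, subOrg h inc n x counts ≠ none := by
  intro n
  induction n with
  | zero =>
    intro V x hVsub hVreach hcard counts
    have := Finset.card_le_card hVsub
    omega
  | succ n ih =>
    intro V x hVsub hVreach hcard counts
    rw [osc_subOrg_succ]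
    cases hg : counts.get? x with
    | some c => simp
    | none =>
      have hchild : ∀ e ∈ (h.get? x).getD [], ∀ c' : PySem.Dict String Int,
          subOrg h inc n e c' ≠ none := by
        intro e he c'
        have hxs : ∃ vs, h.get? x = some vs := by
          cases hget : h.get? x with
          | none => rw [hget] at he; cases he
          | some vs => exact ⟨vs, rfl⟩
        obtain ⟨vs, hvs⟩ := hxs
        have hxkey : x ∈ h.keys.toFinset := List.mem_toFinset.2 (osc_get?_key hvs)
        have hxV : x ∉ V := fun hxV => hac x (hVreach x hxV)
        have hedge : oscEdge h x e := he
        apply ih (insert x V) e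
        · exact Finset.insert_subset_iff.2 ⟨hxkey, hVsub⟩
        · intro v hv
          rcases Finset.mem_insert.1 hv with hvx | hvV
          · rw [hvx]; exact .single hedge
          · exact .tail (hVreach v hvV) hedge
        · rw [Finset.card_insert_of_notMem hxV]; omega
      have hlist : ∀ (es : List String), (∀ e ∈ es, ∀ c' : PySem.Dict String Int,
          subOrg h inc n e c' ≠ none) → ∀ (a : Int) (c0 : PySem.Dict String Int),
          subOrgList h inc n es a c0 ≠ none := by
        intro es
        induction es with
        | nil => intro _ a c0; simp [subOrgList]
        | cons e es ihe =>
          intro hall a c0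
          simp only [subOrgList]
          cases hs : subOrg h inc n e c0 with
          | none => exact absurd hs (hall e (List.mem_cons_self) c0)
          | some p =>
            obtain ⟨v, c1⟩ := p
            exact ihe (fun e' he' => hall e' (List.mem_cons_of_mem _ he')) _ _
      cases hl : subOrgList h inc n ((h.get? x).getD []) 0 counts with
      | none => exact absurd hl (hlist _ hchild 0 counts)
      | some p => obtain ⟨v, c2⟩ := p; simp

-- B's recomputation of the total over the final dict equals A's running count
theorem osc_foldval {h : PySem.Dict String (List String)} {inc : Bool} {fuel : Nat} :
    ∀ {es : List String} {a : Int} {counts : PySem.Dict String Int} {v : Int}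
      {c2 : PySem.Dict String Int},
    subOrgList h inc fuel es a counts = some (v, c2) →
    ∀ t : Int, es.foldl
        (fun t e =>
          let t := t + c2.getD e 0
          if inc || !(h.contains e) then t + 1 else t) t = t + (v - a) := by
  intro es
  induction es with
  | nil =>
    intro a counts v c2 hs t
    cases hs
    simp
  | cons e es ihe =>
    intro a counts v c2 hs t
    simp only [subOrgList] at hs
    cases hsu : subOrg h inc fuel e counts with
    | none => rw [hsu] at hs; cases hs
    | some p =>
      obtain ⟨w, c1⟩ := p
      rw [hsu] at hs
      have hw2 : c2.get? e = some w := osc_extQ hs (osc_ret hsu)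
      have hget : c2.getD e 0 = w := by
        rw [PySem.Dict.getD_eq_get?_getD, hw2]; rfl
      have h2 := ihe hs (if (inc || !(h.contains e)) = true then t + w + 1 else t + w)
      simp only [List.foldl_cons]
      rw [hget]
      have h3 : t + (v - a) = (if (inc || !(h.contains e)) = true then t + w + 1 else t + w)
          + (v - if (inc || !(h.contains e)) = true then a + w + 1 else a + w) := by
        split <;> ring
      rw [h3]
      exact h2

-- the simulation: one completed call of A's recursion = a block of B's loop steps
theorem osc_simP {h : PySem.Dict String (List String)} {inc : Bool} (hac : oscAcyc h) :
    ∀ (fuel : Nat) {m : String} {counts : PySem.Dict String Int} {c : Int}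
      {counts' : PySem.Dict String Int},
    subOrg h inc fuel m counts = some (c, counts') →
    ∀ rest, ∃ k ins, counts'.size = counts.size + ins ∧ k ≤ 1 + ins * (1 + oscDb h) ∧
      ∀ f, loopB h inc (f + k) ((m, false) :: rest) counts = loopB h inc f rest counts' := by
  intro fuel
  induction fuel with
  | zero => intro m counts c counts' hs; cases hs
  | succ n ih =>
    have hQ : ∀ (es : List String) (a : Int) (counts : PySem.Dict String Int) (v : Int)
        (c2 : PySem.Dict String Int) (rest : List (String × Bool)),
        subOrgList h inc n es a counts = some (v, c2) →
        ∃ k ins, c2.size = counts.size + ins ∧ k ≤ es.length + ins * (1 + oscDb h) ∧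
          ∀ f, loopB h inc (f + k) (es.map (fun e => (e, false)) ++ rest) counts =
            loopB h inc f rest c2 := by
      intro es
      induction es with
      | nil =>
        intro a counts v c2 rest hs
        cases hs
        exact ⟨0, 0, by omega, by simp, fun f => by simp⟩
      | cons e es ihe =>
        intro a counts v c2 rest hs
        simp only [subOrgList] at hs
        cases hsu : subOrg h inc n e counts with
        | none => rw [hsu] at hs; cases hs
        | some p =>
          obtain ⟨w, c1⟩ := p
          rw [hsu] at hs
          obtain ⟨k1, ins1, hsz1, hk1, hrun1⟩ := ih hsu (es.map (fun e => (e, false)) ++ rest)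
          obtain ⟨k2, ins2, hsz2, hk2, hrun2⟩ := ihe _ _ _ _ rest hs
          refine ⟨k1 + k2, ins1 + ins2, by omega, ?_, ?_⟩
          · rw [Nat.add_mul]
            generalize ins1 * (1 + oscDb h) = A at hk1 ⊢
            generalize ins2 * (1 + oscDb h) = B at hk2 ⊢
            simp only [List.length_cons]
            omega
          · intro f
            have harith : f + (k1 + k2) = (f + k2) + k1 := by omega
            rw [List.map_cons, List.cons_append, harith, hrun1 (f + k2), hrun2 f]
    intro m counts c counts' hs rest
    rw [osc_subOrg_succ] at hs
    cases hg : counts.get? m with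
    | some c0 =>
      rw [hg] at hs
      simp only [Option.some.injEq, Prod.mk.injEq] at hs
      obtain ⟨h1, h2⟩ := hs
      subst h2
      have hc : counts.contains m = true := by
        rw [PySem.Dict.contains_eq_isSome_get?, hg]; rfl
      refine ⟨1, 0, by omega, by omega, fun f => ?_⟩
      show loopB h inc (f + 1) ((m, false) :: rest) counts = loopB h inc f rest counts
      simp [loopB, hc]
    | none =>
      rw [hg] at hs
      cases hl : subOrgList h inc n ((h.get? m).getD []) 0 counts with
      | none => rw [hl] at hs; cases hs
      | some p =>
        obtain ⟨v, c2⟩ := p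
        rw [hl] at hs
        simp only [Option.some.injEq, Prod.mk.injEq] at hs
        obtain ⟨h1, h2⟩ := hs
        obtain ⟨kq, insq, hszq, hkq, hrunq⟩ := hQ _ _ _ _ _ ((m, true) :: rest) hl
        have hc2m : c2.get? m = none := by
          cases hc2 : c2.get? m with
          | none => rfl
          | some w =>
            exfalso
            obtain ⟨e, he, hke⟩ := osc_newQ hl hg (by simp [hc2])
            have hedge : oscEdge h m e := he
            cases hke with
            | inl heq => rw [← heq] at hedge; exact hac m (.single hedge)
            | inr hre => exact hac m (osc_reach_trans (.single hedge) hre)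
        have hcont : counts.contains m = false := by
          rw [PySem.Dict.contains_eq_isSome_get?, hg]; rfl
        have hcont2 : c2.contains m = false := by
          rw [PySem.Dict.contains_eq_isSome_get?, hc2m]; rfl
        have hins : (c2.insert m v).size = c2.size + 1 := by
          rw [PySem.Dict.size_insert, hcont2]; simp
        refine ⟨kq + 2, insq + 1, ?_, ?_, ?_⟩
        · rw [← h2, hins]; omega
        · have hlen : ((h.get? m).getD []).length ≤ oscDb h := osc_nbrs_len h m
          rw [Nat.succ_mul]
          generalize insq * (1 + oscDb h) = A at hkq ⊢
          omega
        · intro f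
          have harith : f + (kq + 2) = (((f + 1) + kq) + 1) := by omega
          rw [harith]
          have s1 : loopB h inc ((((f + 1) + kq)) + 1) ((m, false) :: rest) counts
              = loopB h inc ((f + 1) + kq)
                  (((h.get? m).getD []).map (fun e => (e, false)) ++ (m, true) :: rest) counts := by
            simp [loopB, hcont]
          rw [s1, hrunq (f + 1)]
          rw [← h2]
          have s2 : loopB h inc (f + 1) ((m, true) :: rest) c2
              = loopB h inc f rest (c2.insert m (((h.get? m).getD []).foldl
                  (fun t e =>
                    let t := t + c2.getD e 0
                    if inc || !(h.contains e) then t + 1 else t) 0)) := by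
            simp [loopB, hcont2]
          rw [s2, osc_foldval hl (0 : Int)]
          norm_num

theorem osc_insert_id {d : PySem.Dict String Int} {k : String} {v : Int}
    (hnd : d.keys.Nodup) (hg : d.get? k = some v) : d.insert k v = d := by
  apply PySem.Dict.ext
  have hc : d.contains k = true := by
    rw [PySem.Dict.contains_eq_isSome_get?, hg]; rfl
  rw [PySem.Dict.items_insert_of_contains d v hc]
  conv_rhs => rw [← List.map_id d.items]
  apply List.map_congr_left
  intro p hp
  obtain ⟨p1, p2⟩ := p
  by_cases hpk : p1 = k
  · have hmem : (k, p2) ∈ d.items := by rw [← hpk]; exact hp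
    have := PySem.Dict.get?_of_mem_items d hmem hnd
    rw [hg] at this
    have hv : p2 = v := by injection this with hh; omega
    simp [hpk, hv]
  · simp [hpk]

-- whole-run simulation over the list of roots
theorem osc_rootSim {h : PySem.Dict String (List String)} {inc : Bool} {F : Nat}
    (hac : oscAcyc h) (hF : h.keys.toFinset.card + 1 ≤ F) :
    ∀ (roots : List String) (counts : PySem.Dict String Int), counts.keys.Nodup →
    ∃ k ins,
      (roots.foldl
        (fun counts m =>
          match subOrg h inc F m counts with
          | none => counts
          | some (c, counts1) => counts1.insert m c) counts).size = counts.size + ins ∧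
      k ≤ roots.length + ins * (1 + oscDb h) ∧
      (roots.foldl
        (fun counts m =>
          match subOrg h inc F m counts with
          | none => counts
          | some (c, counts1) => counts1.insert m c) counts).keys.Nodup ∧
      ∀ f, loopB h inc (f + k) (roots.map (fun m => (m, false)) ++ []) counts =
        loopB h inc f []
          (roots.foldl
            (fun counts m =>
              match subOrg h inc F m counts with
              | none => counts
              | some (c, counts1) => counts1.insert m c) counts) := by
  intro roots
  induction roots with
  | nil =>
    intro counts hnd
    exact ⟨0, 0, by simp, by simp, by simpa using hnd, fun f => by simp⟩
  | cons r roots ihr =>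
    intro counts hnd
    have hne := osc_a1 (inc := inc) hac F ∅ r (Finset.empty_subset _) (by simp) (by simpa using hF) counts
    cases hs : subOrg h inc F r counts with
    | none => exact absurd hs hne
    | some p =>
      obtain ⟨c, c1⟩ := p
      have hret := osc_ret hs
      have hnd1 := osc_nodupP F hs hnd
      have hid : c1.insert r c = c1 := osc_insert_id hnd1 hret
      have hstep : (r :: roots).foldl
          (fun counts m =>
            match subOrg h inc F m counts with
            | none => counts
            | some (c, counts1) => counts1.insert m c) counts
          = roots.foldl
            (fun counts m =>
              match subOrg h inc F m counts with
              | none => counts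
              | some (c, counts1) => counts1.insert m c) c1 := by
        rw [List.foldl_cons]
        congr 1
        rw [hs]
        show c1.insert r c = c1
        exact hid
      obtain ⟨k1, ins1, hsz1, hk1, hrun1⟩ := osc_simP hac F hs (roots.map (fun m => (m, false)) ++ [])
      obtain ⟨k2, ins2, hsz2, hk2, hnd2, hrun2⟩ := ihr c1 hnd1
      rw [hstep]
      refine ⟨k1 + k2, ins1 + ins2, by omega, ?_, hnd2, ?_⟩
      · rw [Nat.add_mul]
        generalize ins1 * (1 + oscDb h) = A at hk1 ⊢
        generalize ins2 * (1 + oscDb h) = B at hk2 ⊢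
        simp only [List.length_cons]
        omega
      · intro f
        have harith : f + (k1 + k2) = (f + k2) + k1 := by omega
        rw [List.map_cons, List.cons_append, harith, hrun1 (f + k2), hrun2 f]

theorem osc_newRoot {h : PySem.Dict String (List String)} {inc : Bool} {F : Nat} :
    ∀ (roots : List String) (counts : PySem.Dict String Int) (k : String),
    (roots.foldl
      (fun counts m =>
        match subOrg h inc F m counts with
        | none => counts
        | some (c, counts1) => counts1.insert m c) counts).get? k ≠ none →
    counts.get? k ≠ none ∨ ∃ r ∈ roots, k = r ∨ oscReach h r k := by
  intro roots
  induction roots with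
  | nil => intro counts k hk; exact Or.inl hk
  | cons r roots ihr =>
    intro counts k hk
    rw [List.foldl_cons] at hk
    rcases ihr _ k hk with hmid | ⟨r', hr', hrr⟩
    · cases hs : subOrg h inc F r counts with
      | none =>
        rw [hs] at hmid
        exact Or.inl hmid
      | some p =>
        obtain ⟨c, c1⟩ := p
        rw [hs] at hmid
        by_cases hkr : k = r
        · exact Or.inr ⟨r, List.mem_cons_self, Or.inl hkr⟩
        · rw [PySem.Dict.get?_insert, if_neg hkr] at hmid
          cases hg : counts.get? k with
          | some w => exact Or.inl (by simp)
          | none =>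
            rcases osc_newP F hs hg hmid with heq | hre
            · exact Or.inr ⟨r, List.mem_cons_self, Or.inl heq⟩
            · exact Or.inr ⟨r, List.mem_cons_self, Or.inr hre⟩
    · exact Or.inr ⟨r', List.mem_cons_of_mem _ hr', hrr⟩

-- ===== the Pre_ ↔ acyclicity bridge =====
theorem osc_S_succ_subset (h_ : List (String × List String)) (x : String) (i : Nat) :
    oscS h_ x i ⊆ oscS h_ x (i+1) := by
  simp only [oscS]
  exact Finset.subset_union_left

theorem osc_S_mono (h_ : List (String × List String)) (x : String) :
    ∀ {i j : Nat}, i ≤ j → oscS h_ x i ⊆ oscS h_ x j := by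
  intro i j hij
  induction j, hij using Nat.le_induction with
  | base => exact Finset.Subset.refl _
  | succ j hij ih => exact ih.trans (osc_S_succ_subset h_ x j)

theorem osc_reach_S_exists {h_ : List (String × List String)} {x y : String}
    (hr : oscReach (PySem.Dict.mk h_) x y) : ∃ i, y ∈ oscS h_ x i := by
  induction hr with
  | single e => exact ⟨0, List.mem_toFinset.2 e⟩
  | tail hr e ih =>
    obtain ⟨i, hi⟩ := ih
    exact ⟨i + 1, Finset.mem_union_right _ (Finset.mem_biUnion.2 ⟨_, hi, List.mem_toFinset.2 e⟩)⟩

theorem osc_nbrsF_subset_U (h_ : List (String × List String)) (y : String) :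
    oscNbrsF h_ y ⊆ (h_.map Prod.fst ++ h_.flatMap (fun p => p.2)).toFinset := by
  intro z hz
  rw [List.mem_toFinset]
  apply List.mem_append_right
  have hz' : z ∈ ((PySem.Dict.mk h_).get? y).getD [] := List.mem_toFinset.1 hz
  cases hg : (PySem.Dict.mk h_).get? y with
  | none => rw [hg] at hz'; cases hz'
  | some vs =>
    rw [hg] at hz'
    exact osc_get?_mem_flat hg hz'

theorem osc_S_subset_U (h_ : List (String × List String)) (x : String) :
    ∀ i, oscS h_ x i ⊆ (h_.map Prod.fst ++ h_.flatMap (fun p => p.2)).toFinset := by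
  intro i
  induction i with
  | zero => exact osc_nbrsF_subset_U h_ x
  | succ i ih =>
    simp only [oscS]
    apply Finset.union_subset ih
    apply Finset.biUnion_subset.2
    intro y _
    exact osc_nbrsF_subset_U h_ y

theorem osc_S_stab (h_ : List (String × List String)) (x : String) :
    ∃ i < oscN h_, oscS h_ x (i+1) = oscS h_ x i := by
  by_contra hno
  push_neg at hno
  have hgrow : ∀ i, i ≤ oscN h_ → i ≤ (oscS h_ x i).card := by
    intro i
    induction i with
    | zero => omega
    | succ i ih =>
      intro hle
      have hss : oscS h_ x i ⊂ oscS h_ x (i+1) :=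
        Finset.ssubset_iff_subset_ne.2 ⟨osc_S_succ_subset h_ x i, (hno i (by omega)).symm⟩
      have := Finset.card_lt_card hss
      have := ih (by omega)
      omega
  have h1 := hgrow (oscN h_) le_rfl
  have h2 := Finset.card_le_card (osc_S_subset_U h_ x (oscN h_))
  have h3 : oscN h_ = ((h_.map Prod.fst ++ h_.flatMap (fun p => p.2)).toFinset).card + 1 := rfl
  omega

theorem osc_S_stab_ge (h_ : List (String × List String)) (x : String) {i : Nat}
    (hst : oscS h_ x (i+1) = oscS h_ x i) : ∀ j, i ≤ j → oscS h_ x j = oscS h_ x i := by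
  intro j hij
  induction j, hij using Nat.le_induction with
  | base => rfl
  | succ j hij ih =>
    rw [show oscS h_ x (j+1) = oscS h_ x j ∪ (oscS h_ x j).biUnion (oscNbrsF h_) from rfl, ih]
    exact hst

theorem osc_reach_S {h_ : List (String × List String)} {x y : String}
    (hr : oscReach (PySem.Dict.mk h_) x y) : y ∈ oscS h_ x (oscN h_) := by
  obtain ⟨i0, hi0⟩ := osc_reach_S_exists hr
  obtain ⟨is, hisN, hstab⟩ := osc_S_stab h_ x
  by_cases hle : i0 ≤ oscN h_
  · exact osc_S_mono h_ x hle hi0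
  · have h1 : oscS h_ x i0 = oscS h_ x is := osc_S_stab_ge h_ x hstab i0 (by omega)
    have h2 : oscS h_ x (oscN h_) = oscS h_ x is := osc_S_stab_ge h_ x hstab (oscN h_) (by omega)
    rw [h2, ← h1]
    exact hi0

-- Pre_ really is acyclicity
theorem osc_pre_acyc {h_ : List (String × List String)} {inc : Bool}
    (hp : Pre_org_size_count h_ inc) : oscAcyc (PySem.Dict.mk h_) := by
  intro x hx
  have hedge0 : ∀ b, oscReach (PySem.Dict.mk h_) x b → ∃ z, oscEdge (PySem.Dict.mk h_) x z := by
    intro b hb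
    induction hb with
    | single e => exact ⟨_, e⟩
    | tail _ _ ih => exact ih
  obtain ⟨z, hz⟩ := hedge0 x hx
  have hxkey : x ∈ h_.map Prod.fst := by
    have hz' : z ∈ ((PySem.Dict.mk h_).get? x).getD [] := hz
    cases hg : (PySem.Dict.mk h_).get? x with
    | none => rw [hg] at hz'; cases hz'
    | some vs =>
      have := osc_get?_key hg
      rwa [PySem.Dict.keys_mk] at this
  exact hp x hxkey (osc_reach_S hx)

-- ===== VERDICT (by name: the statement is the Claim_ definition above) =====
theorem org_size_count_spec : Claim_equal_org_size_count := by
  intro h_ inc _hdom hpre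
  unfold Spec_org_size_count
  have hac := osc_pre_acyc hpre
  have hF : (PySem.Dict.mk h_).keys.toFinset.card + 1 ≤ h_.length + 2 := by
    have h1 : (PySem.Dict.mk h_).keys.toFinset.card ≤ (PySem.Dict.mk h_).keys.length :=
      List.toFinset_card_le _
    have h2 : (PySem.Dict.mk h_).keys.length = h_.length := by
      rw [PySem.Dict.keys_mk, List.length_map]
    omega
  obtain ⟨k, ins, hsz, hk, hnd, hrun⟩ :=
    osc_rootSim (h := PySem.Dict.mk h_) (inc := inc) (F := h_.length + 2) hac hF
      (PySem.Dict.mk h_).keys PySem.Dict.empty (by rw [PySem.Dict.keys_empty]; exact List.nodup_nil)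
  set final := (PySem.Dict.mk h_).keys.foldl
    (fun counts m =>
      match subOrg (PySem.Dict.mk h_) inc (h_.length + 2) m counts with
      | none => counts
      | some (c, counts1) => counts1.insert m c) PySem.Dict.empty with hfinal
  -- bound on the number of inserted keys
  have hkeysfin : ∀ kk ∈ final.keys, kk ∈ h_.map Prod.fst ++ h_.flatMap (fun p => p.2) := by
    intro kk hkk
    have hcc : final.contains kk = true := (PySem.Dict.contains_iff_mem_keys _ _).2 hkk
    rw [PySem.Dict.contains_eq_isSome_get?] at hcc
    have hne : final.get? kk ≠ none := by
      intro hzz; rw [hzz] at hcc; cases hcc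
    rcases osc_newRoot (PySem.Dict.mk h_).keys PySem.Dict.empty kk hne with hl | ⟨r, hr, hkr⟩
    · rw [PySem.Dict.get?_empty] at hl; exact absurd rfl hl
    · cases hkr with
      | inl heq =>
        apply List.mem_append_left
        rw [heq, ← PySem.Dict.keys_mk (ps := h_)]
        exact hr
      | inr hre =>
        have hlast : ∃ y, oscEdge (PySem.Dict.mk h_) y kk := by
          cases hre with
          | single e => exact ⟨_, e⟩
          | tail _ e => exact ⟨_, e⟩
        obtain ⟨y, hy⟩ := hlast
        have hy' : kk ∈ ((PySem.Dict.mk h_).get? y).getD [] := hy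
        cases hg : (PySem.Dict.mk h_).get? y with
        | none => rw [hg] at hy'; cases hy'
        | some vs =>
          rw [hg] at hy'
          exact List.mem_append_right _ (osc_get?_mem_flat hg hy')
  have hlen_flat : (h_.flatMap (fun p => p.2)).length = oscD h_ := by
    rw [List.length_flatMap]; rfl
  have hsizebound : final.size ≤ h_.length + oscD h_ := by
    have e1 : final.size = final.keys.length := by
      show final.items.length = (final.items.map (fun p => p.1)).length
      rw [List.length_map]
    have e2 : final.keys.length = final.keys.toFinset.card :=
      (List.toFinset_card_of_nodup hnd).symm
    have e3 : final.keys.toFinset ⊆ (h_.map Prod.fst ++ h_.flatMap (fun p => p.2)).toFinset := by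
      intro a ha
      exact List.mem_toFinset.2 (hkeysfin a (List.mem_toFinset.1 ha))
    have e4 := Finset.card_le_card e3
    have e5 := List.toFinset_card_le (h_.map Prod.fst ++ h_.flatMap (fun p => p.2))
    rw [List.length_append, List.length_map, hlen_flat] at e5
    omega
  have hDb : oscDb (PySem.Dict.mk h_) = oscD h_ := rfl
  have hkeyslen : (PySem.Dict.mk h_).keys.length = h_.length := by
    rw [PySem.Dict.keys_mk, List.length_map]
  have hfuelk : k ≤ (h_.length + oscD h_ + 2) * (oscD h_ + 2) := by
    rw [PySem.Dict.size_empty] at hsz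
    have hins : ins ≤ h_.length + oscD h_ := by omega
    rw [hDb, hkeyslen] at hk
    have hm1 : ins * (1 + oscD h_) ≤ (h_.length + oscD h_) * (1 + oscD h_) :=
      Nat.mul_le_mul_right _ hins
    have hexp : (h_.length + oscD h_ + 2) * (oscD h_ + 2)
        = (h_.length + oscD h_) * (1 + oscD h_) + (h_.length + oscD h_) + 2 * (oscD h_ + 2) := by
      ring
    generalize hA : (h_.length + oscD h_) * (1 + oscD h_) = A at hm1 hexp
    generalize hB : ins * (1 + oscD h_) = B at hk hm1
    omega
  have hrun' := hrun ((h_.length + oscD h_ + 2) * (oscD h_ + 2) - k)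
  rw [Nat.sub_add_cancel hfuelk] at hrun'
  have hstop : loopB (PySem.Dict.mk h_) inc ((h_.length + oscD h_ + 2) * (oscD h_ + 2) - k) [] final
      = final := by
    cases hza : (h_.length + oscD h_ + 2) * (oscD h_ + 2) - k with
    | zero => rfl
    | succ nn => rfl
  rw [hstop] at hrun'
  show org_size_count h_ inc = org_size_count_alt h_ inc
  unfold org_size_count org_size_count_alt
  simp only []
  rw [List.append_nil] at hrun'
  rw [← hfinal]  -- placeholder; adjusted below if needed
  rw [← hrun']
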